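-- pv_equiv track=rewrite | github.com/iansedano/aoc | python/src/aoc/2023/05.py | find_seed_locations
-- ===== SOURCE A (Python) =====
-- def find_seed_locations(seed_ranges, almanac):
--     for transform_ranges in almanac:
--         seed_ranges = [
--             new_range
--             for seed_range in seed_ranges
--             for new_range in apply_transform(*seed_range, transform_ranges)
--         ]
--     return seed_ranges
--
-- def apply_transform(seed_start, seed_stop, transform_ranges):
--     """With help from @gahjelle"""
--     if seed_stop <= seed_start:
--         return []
--
--     for t_start, t_stop, offset in transform_ranges:
--         if t_start >= seed_stop or t_stop <= seed_start:
--             continue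
--
--         left = seed_start, max(t_start, seed_start)  # Can be nothing
--         middle = max(t_start, seed_start), min(t_stop, seed_stop)
--         right = min(t_stop, seed_stop), seed_stop  # Can be nothing
--
--         return (
--             apply_transform(*left, transform_ranges)
--             + [(middle[0] + offset, middle[1] + offset)]
--             + apply_transform(*right, transform_ranges)
--         )
--
--     return [(seed_start, seed_stop)]
-- ===== SOURCE B (Python) =====
-- def find_seed_locations(seed_ranges, almanac):
--     for transforms in almanac:
--         result = []
--         for seed in seed_ranges:
--             # explicit worklist instead of recursion; pieces marked True are final
--             stack = [(seed[0], seed[1], False)]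
--             while stack:
--                 a, b, mapped = stack.pop()
--                 if mapped:
--                     result.append((a, b))
--                     continue
--                 if b <= a:
--                     continue
--                 for t_start, t_stop, offset in transforms:
--                     if t_start < b and a < t_stop:
--                         lo = max(t_start, a)
--                         hi = min(t_stop, b)
--                         stack.append((hi, b, False))
--                         stack.append((lo + offset, hi + offset, True))
--                         stack.append((a, lo, False))
--                         break
--                 else:
--                     result.append((a, b))
--         seed_ranges = result
--     return seed_ranges
-- ===== Notes on version B (the rewrite author's own statement) =====
-- stated objective: alternative
-- what changed: Replaces apply_transform's double self-recursion (and the per-layer nested list comprehension) with an iterative explicit worklist: each seed range is split by pushing left/middle/right pieces onto a stack, middle pieces tagged as final, appending into one shared result accumulator per layer.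
import Mathlib
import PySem

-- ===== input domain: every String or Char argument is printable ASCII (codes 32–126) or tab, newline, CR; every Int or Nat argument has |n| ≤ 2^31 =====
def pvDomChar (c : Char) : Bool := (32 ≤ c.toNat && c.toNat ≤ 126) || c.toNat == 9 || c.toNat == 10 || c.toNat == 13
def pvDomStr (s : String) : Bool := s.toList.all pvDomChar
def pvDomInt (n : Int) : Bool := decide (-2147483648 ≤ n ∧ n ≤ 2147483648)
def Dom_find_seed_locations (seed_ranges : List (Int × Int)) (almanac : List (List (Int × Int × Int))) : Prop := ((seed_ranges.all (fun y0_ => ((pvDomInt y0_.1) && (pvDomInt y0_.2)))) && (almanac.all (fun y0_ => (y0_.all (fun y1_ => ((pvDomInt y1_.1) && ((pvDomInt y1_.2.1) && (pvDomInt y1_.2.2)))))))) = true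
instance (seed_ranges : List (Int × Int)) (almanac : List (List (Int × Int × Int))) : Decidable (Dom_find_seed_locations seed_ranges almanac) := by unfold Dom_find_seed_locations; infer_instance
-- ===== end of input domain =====

-- B replaces A's double self-recursion with an iterative explicit worklist (stack of
-- tagged pieces) and one shared per-layer accumulator; same cost, no recursion depth.

-- termination facts the ports cite by name in their decreasing_by
theorem found_overlap (a b : Int) (ts : List (Int × Int × Int)) (t1 t2 off : Int)
    (h : ts.find? (fun t => decide (t.1 < b) && decide (a < t.2.1)) = some (t1, t2, off)) :
    t1 < b ∧ a < t2 := by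
  have hp := List.find?_some h
  simp only [Bool.and_eq_true, decide_eq_true_eq] at hp
  exact hp

theorem apply_dec_left (s e t1 : Int) (h0 : ¬ e ≤ s) (h1 : t1 < e) :
    (max t1 s - s).toNat < (e - s).toNat := by omega

theorem apply_dec_right (s e t2 : Int) (h0 : ¬ e ≤ s) (h2 : s < t2) :
    (e - min t2 e).toNat < (e - s).toNat := by omega

theorem stack_dec_done (S : Nat) : S < 1 + S := by omega

theorem stack_dec_skip (a b : Int) (S : Nat) : S < 4 ^ (b - a).toNat + S :=
  Nat.lt_add_of_pos_left (Nat.pow_pos (by omega))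

theorem stack_dec_split (a b t_start t_stop : Int) (S : Nat)
    (hba : ¬ b ≤ a) (h1 : t_start < b) (h2 : a < t_stop) :
    4 ^ (max t_start a - a).toNat + (1 + (4 ^ (b - min t_stop b).toNat + S)) <
      4 ^ (b - a).toNat + S := by
  have e1 : 4 ^ (max t_start a - a).toNat ≤ 4 ^ ((b - a).toNat - 1) :=
    Nat.pow_le_pow_right (by omega) (by omega)
  have e2 : 4 ^ (b - min t_stop b).toNat ≤ 4 ^ ((b - a).toNat - 1) :=
    Nat.pow_le_pow_right (by omega) (by omega)
  have e3 : 1 ≤ 4 ^ ((b - a).toNat - 1) := Nat.one_le_pow _ _ (by omega)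
  have e4 : 4 ^ (b - a).toNat = 4 ^ ((b - a).toNat - 1) * 4 := by
    rw [← pow_succ]; congr 1; omega
  linarith

-- termination measure for the worklist loop (a done piece weighs 1, a raw piece 4^length)
def stackMeasure (stack : List (Int × Int × Bool)) : Nat :=
  (stack.map (fun it => if it.2.2 then 1 else 4 ^ ((it.2.1 - it.1).toNat))).sum

theorem stackMeasure_done (a b : Int) (rest : List (Int × Int × Bool)) :
    stackMeasure rest < stackMeasure ((a, b, true) :: rest) := by
  simp only [stackMeasure, List.map_cons, List.sum_cons, if_true]
  exact stack_dec_done _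

theorem stackMeasure_raw (a b : Int) (rest : List (Int × Int × Bool)) :
    stackMeasure rest < stackMeasure ((a, b, false) :: rest) := by
  simp only [stackMeasure, List.map_cons, List.sum_cons, Bool.false_eq_true, if_false]
  exact stack_dec_skip a b _

theorem stackMeasure_split (a b t_start t_stop offset : Int) (rest : List (Int × Int × Bool))
    (hba : ¬ b ≤ a) (h1 : t_start < b) (h2 : a < t_stop) :
    stackMeasure ((a, max t_start a, false)
        :: (max t_start a + offset, min t_stop b + offset, true)
        :: (min t_stop b, b, false) :: rest) <
      stackMeasure ((a, b, false) :: rest) := by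
  simp only [stackMeasure, List.map_cons, List.sum_cons, Bool.false_eq_true, if_true, if_false]
  exact stack_dec_split a b t_start t_stop _ hba h1 h2

-- ===== PORT A =====
-- apply_transform: the for-loop with early return is the first transform range
-- overlapping the seed range (List.find?); recursion on the left and right pieces.
def applyTransform (seed_start seed_stop : Int) (transform_ranges : List (Int × Int × Int)) : List (Int × Int) :=
  if seed_stop ≤ seed_start then []
  else
    match h : transform_ranges.find? (fun t => decide (t.1 < seed_stop) && decide (seed_start < t.2.1)) with
    | some (t_start, t_stop, offset) =>
        applyTransform seed_start (max t_start seed_start) transform_ranges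
          ++ [(max t_start seed_start + offset, min t_stop seed_stop + offset)]
          ++ applyTransform (min t_stop seed_stop) seed_stop transform_ranges
    | none => [(seed_start, seed_stop)]
termination_by (seed_stop - seed_start).toNat
decreasing_by
  · exact apply_dec_left _ _ _ (by assumption) (found_overlap _ _ _ _ _ _ h).1
  · exact apply_dec_right _ _ _ (by assumption) (found_overlap _ _ _ _ _ _ h).2

def find_seed_locations (seed_ranges : List (Int × Int)) (almanac : List (List (Int × Int × Int))) : List (Int × Int) :=
  almanac.foldl
    (fun sr transform_ranges =>
      sr.flatMap (fun seed_range => applyTransform seed_range.1 seed_range.2 transform_ranges))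
    seed_ranges

-- ===== PORT B =====
-- the while-loop over the explicit stack (top of the stack = head of the list)
def runStack (stack : List (Int × Int × Bool)) (transforms : List (Int × Int × Int)) (result : List (Int × Int)) : List (Int × Int) :=
  match stack with
  | [] => result
  | (a, b, true) :: rest => runStack rest transforms (result ++ [(a, b)])
  | (a, b, false) :: rest =>
    if b ≤ a then runStack rest transforms result
    else
      match h : transforms.find? (fun t => decide (t.1 < b) && decide (a < t.2.1)) with
      | some (t_start, t_stop, offset) =>
          runStack ((a, max t_start a, false)
              :: (max t_start a + offset, min t_stop b + offset, true)
              :: (min t_stop b, b, false) :: rest) transforms result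
      | none => runStack rest transforms (result ++ [(a, b)])
termination_by stackMeasure stack
decreasing_by
  · exact stackMeasure_done a b rest
  · exact stackMeasure_raw a b rest
  · exact stackMeasure_split a b t_start t_stop offset rest (by assumption)
      (found_overlap _ _ _ _ _ _ h).1 (found_overlap _ _ _ _ _ _ h).2
  · exact stackMeasure_raw a b rest

def find_seed_locations_alt (seed_ranges : List (Int × Int)) (almanac : List (List (Int × Int × Int))) : List (Int × Int) :=
  almanac.foldl
    (fun sr transforms =>
      sr.foldl (fun result seed => runStack [(seed.1, seed.2, false)] transforms result) [])
    seed_ranges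

-- ===== PRECONDITION & SPEC =====
def Spec_find_seed_locations (seed_ranges : List (Int × Int)) (almanac : List (List (Int × Int × Int))) (out : List (Int × Int)) : Prop := out = find_seed_locations_alt seed_ranges almanac
instance (seed_ranges : List (Int × Int)) (almanac : List (List (Int × Int × Int))) (out : List (Int × Int)) : Decidable (Spec_find_seed_locations seed_ranges almanac out) := by unfold Spec_find_seed_locations; infer_instance

-- ===== CLAIM (what is proved, stated in full; the proofs are below) =====
def Claim_equal_find_seed_locations : Prop := ∀ (seed_ranges : List (Int × Int)) (almanac : List (List (Int × Int × Int))), Dom_find_seed_locations seed_ranges almanac → Spec_find_seed_locations seed_ranges almanac (find_seed_locations seed_ranges almanac)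

-- ===== LEMMAS AND PROOFS =====

-- unfolding equations of A's apply_transform, one per branch
theorem apply_empty (a b : Int) (ts : List (Int × Int × Int)) (hba : b ≤ a) :
    applyTransform a b ts = [] := by
  rw [applyTransform]; simp [hba]

theorem apply_none (a b : Int) (ts : List (Int × Int × Int)) (hba : ¬ b ≤ a)
    (h : ts.find? (fun t => decide (t.1 < b) && decide (a < t.2.1)) = none) :
    applyTransform a b ts = [(a, b)] := by
  rw [applyTransform, if_neg hba]
  split
  · next heq => rw [h] at heq; simp at heq
  · rfl

theorem apply_some (a b : Int) (ts : List (Int × Int × Int)) (t_start t_stop offset : Int)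
    (hba : ¬ b ≤ a)
    (h : ts.find? (fun t => decide (t.1 < b) && decide (a < t.2.1)) = some (t_start, t_stop, offset)) :
    applyTransform a b ts =
      applyTransform a (max t_start a) ts
        ++ [(max t_start a + offset, min t_stop b + offset)]
        ++ applyTransform (min t_stop b) b ts := by
  rw [applyTransform, if_neg hba]
  split
  · next t1 t2 off heq =>
      rw [h] at heq
      simp only [Option.some.injEq, Prod.mk.injEq] at heq
      obtain ⟨rfl, rfl, rfl⟩ := heq
      simp
  · next heq => rw [h] at heq; simp at heq

-- the stack loop flushes the whole stack: each final piece as itself, each raw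
-- piece as A's recursive apply_transform of it, in stack order after `result`.
theorem runStack_eq (transforms : List (Int × Int × Int)) (stack : List (Int × Int × Bool)) (result : List (Int × Int)) :
    runStack stack transforms result =
      result ++ stack.flatMap (fun it =>
        if it.2.2 then [(it.1, it.2.1)] else applyTransform it.1 it.2.1 transforms) := by
  induction stack, result using runStack.induct (transforms := transforms) with
  | case1 result => simp [runStack]
  | case2 result a b rest ih =>
      rw [runStack, ih]; simp
  | case3 result a b rest hba ih =>
      rw [runStack]; simp only [if_pos hba]
      rw [ih]
      simp [apply_empty a b transforms hba]
  | case4 result a b rest hba t_start t_stop offset h ih =>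
      rw [runStack, if_neg hba]
      split
      · next t1 t2 off heq =>
          rw [h] at heq
          simp only [Option.some.injEq, Prod.mk.injEq] at heq
          obtain ⟨rfl, rfl, rfl⟩ := heq
          rw [ih]
          simp [apply_some a b transforms t_start t_stop offset hba h]
      · next heq => rw [h] at heq; simp at heq
  | case5 result a b rest hba h ih =>
      rw [runStack, if_neg hba]
      split
      · next t1 t2 off heq => rw [h] at heq; simp at heq
      · rw [ih]
        simp [apply_none a b transforms hba h]

theorem layer_eq (sr : List (Int × Int)) (transforms : List (Int × Int × Int)) (init : List (Int × Int)) :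
    sr.foldl (fun result seed => runStack [(seed.1, seed.2, false)] transforms result) init =
      init ++ sr.flatMap (fun seed => applyTransform seed.1 seed.2 transforms) := by
  induction sr generalizing init with
  | nil => simp
  | cons p tl ih =>
      rw [List.foldl_cons, runStack_eq transforms, ih]
      simp

theorem find_seed_locations_eq (almanac : List (List (Int × Int × Int))) :
    ∀ (seed_ranges : List (Int × Int)),
      find_seed_locations seed_ranges almanac = find_seed_locations_alt seed_ranges almanac := by
  induction almanac with
  | nil => intro sr; rfl
  | cons ts tl ih =>
      intro sr
      have h1 : find_seed_locations sr (ts :: tl)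
          = find_seed_locations (sr.flatMap (fun p => applyTransform p.1 p.2 ts)) tl := rfl
      have h2 : find_seed_locations_alt sr (ts :: tl)
          = find_seed_locations_alt
              (sr.foldl (fun result seed => runStack [(seed.1, seed.2, false)] ts result) []) tl := rfl
      rw [h1, h2, layer_eq, List.nil_append]
      exact ih _

-- ===== VERDICT (by name: the statement is the Claim_ definition above) =====
theorem find_seed_locations_spec : Claim_equal_find_seed_locations := by
  intro sr al _
  exact find_seed_locations_eq al sr
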